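-- pv_equiv track=rewrite | github.com/cris30158/algoritmia-y-complejidad | otros/mylib5.py | secuencia
-- ===== SOURCE A (Python) =====
-- def secuencia(dato, N, index, act,resultados):
--     """
--     Genera todas las secuencias posibles de longitud N a partir de los dígitos de la cadena 'dato',
--     respetando el orden relativo de los dígitos. No se permiten duplicados en el resultado.
--
--     Args:
--     - dato (str): cadena de dígitos.
--     - N (int): longitud de las secuencias a generar.
--     - index (int): posición actual en la cadena.
--     - act (str): secuencia parcial en construcción.
--     - resultados (list): lista donde se almacenan las soluciones únicas.
--
--     Returns:
--     - list: lista de secuencias válidas sin duplicados.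
--
--
--     >>> secuencia("", 3, 0, "", [])
--     []
--
--     >>> secuencia("123", 0, 0, "", [])
--     []
--
--     >>> r = secuencia("123", 2, 0, "", [])
--     >>> sorted(r)
--     ['12', '13', '23']
--
--     >>> r = secuencia("115", 2, 0, "", [])
--     >>> sorted(r)
--     ['11', '15']
--
--     >>> r = secuencia("1234", 3, 0, "", [])
--     >>> sorted(r)
--     ['123', '124', '134', '234']
--
--     >>> r = secuencia("111", 2, 0, "", [])
--     >>> sorted(r)
--     ['11']
--
--     >>> r = secuencia("1151451", 4, 0, "", [])
--     >>> sorted(r)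
--     ['1111', '1114', '1115', '1141', '1145', '1151', '1154', '1155', '1451', '1511', '1514', '1515', '1541', '1545', '1551', '5141', '5145', '5151', '5451']
--     """
--     if N <= 0: # Si se solicita una longitud 0 o negativa, no se puede formar ningún número válido.
--         return resultados
--
--     if len(act) == N and (act not in resultados):
--         resultados.append(act) # Si ya se ha construido una secuencia de longitud N y no está duplicada, se añade a los resultados.
--         return resultados # Se termina esta rama de exploración.
--
--     if index >= len(dato):
--         # Si se ha llegado al final de la cadena y no se ha alcanzado longitud N, no se puede continuar.
--         return resultados
--
--     for i in range(index, len(dato)):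
--         # En cada posición desde el índice actual hasta el final:
--         # Se incluye el dígito actual al camino y se continúa desde el siguiente índice.
--         secuencia(dato, N, i + 1, act + dato[i], resultados)
--
--     return resultados # Se devuelve la lista de resultados una vez finalizada la exploración.
-- ===== SOURCE B (Python) =====
-- def secuencia(dato, N, index, act, resultados):
--     if N <= 0:
--         return resultados
--     need = N - len(act)
--     if need < 0:
--         return resultados
--     tail = dato[index:]
--     if len(tail) < need:
--         return resultados
--     # comb[k] = ordered subsequences of length k of the current suffix of tail,
--     # built bottom-up from the empty suffix, back to front.
--     comb = [['']] + [[] for _ in range(need)]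
--     for j in range(len(tail) - 1, -1, -1):
--         for k in range(need, 0, -1):
--             comb[k] = [tail[j] + c for c in comb[k - 1]] + comb[k]
--     for c in comb[need]:
--         s = act + c
--         if s not in resultados:
--             resultados.append(s)
--     return resultados
-- ===== Notes on version B (the rewrite author's own statement) =====
-- stated objective: alternative
-- what changed: A's DFS recursion (which revisits every shorter prefix and keeps recursing past length N below duplicate hits) is replaced by an iterative bottom-up suffix DP that builds the rows of length-k combinations of dato[index:] once and then appends each candidate act+combo with the same dedup-against-resultados rule, preserving A's append order and in-place mutation.
-- outside the precondition, e.g. on secuencia('ab', 1, -1, '', []): A returns ['b', 'a'], B returns ['b']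
import Mathlib
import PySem

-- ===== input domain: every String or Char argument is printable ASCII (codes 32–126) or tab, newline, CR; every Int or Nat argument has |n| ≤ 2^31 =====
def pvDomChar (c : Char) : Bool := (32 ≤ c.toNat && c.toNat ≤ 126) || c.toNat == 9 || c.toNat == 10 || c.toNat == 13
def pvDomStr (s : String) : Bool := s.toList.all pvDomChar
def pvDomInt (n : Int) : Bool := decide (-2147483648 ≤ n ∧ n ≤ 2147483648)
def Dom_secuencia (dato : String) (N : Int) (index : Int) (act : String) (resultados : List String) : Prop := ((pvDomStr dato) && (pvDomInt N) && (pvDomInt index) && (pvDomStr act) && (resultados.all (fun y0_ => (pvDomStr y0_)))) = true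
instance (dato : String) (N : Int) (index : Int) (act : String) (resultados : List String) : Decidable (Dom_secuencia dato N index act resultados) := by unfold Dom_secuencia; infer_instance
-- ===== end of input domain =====

-- B replaces A's DFS (which also keeps recursing below duplicate hits and past length N) by one
-- iterative suffix DP enumerating each length-`need` combination once; equivalence is about the
-- RETURN value only (both Pythons also append to `resultados` in place, in the same order).

-- ===== PORT A =====
-- Strings are carried as their character lists (PySem's representation); the for-loop over
-- range(index, len(dato)) is the index recursion secuenciaLoop.  dato[i] is PySem.List.pyGetD
-- (the default ' ' is only reached where Python would raise IndexError, outside Pre_).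
mutual
def secuenciaGo (dato : List Char) (N : Int) (index : Int) (act : List Char) (resultados : List String) : List String :=
  if N ≤ 0 then resultados
  else if (act.length : Int) = N ∧ String.ofList act ∉ resultados then resultados ++ [String.ofList act]
  else if (dato.length : Int) ≤ index then resultados
  else secuenciaLoop dato N index act resultados
  termination_by (((dato.length : Int) - index).toNat * 2 + 1)
  decreasing_by omega
def secuenciaLoop (dato : List Char) (N : Int) (i : Int) (act : List Char) (resultados : List String) : List String :=
  if h : i < (dato.length : Int) then
    secuenciaLoop dato N (i + 1) act
      (secuenciaGo dato N (i + 1) (act ++ [PySem.List.pyGetD dato i ' ']) resultados)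
  else resultados
  termination_by (((dato.length : Int) - i).toNat * 2)
  decreasing_by
    · omega
    · omega
end

def secuencia (dato : String) (N : Int) (index : Int) (act : String) (resultados : List String) : List String :=
  secuenciaGo dato.toList N index act.toList resultados

-- ===== PORT B =====
-- Source B's inner `for k in range(need, 0, -1): comb[k] = [tail[j] + c for c in comb[k-1]] + comb[k]`
-- (each comb[k-1] still the old row, k runs downwards) is this pure one-step row update.
def altStep (c : Char) (comb : List (List (List Char))) : List (List (List Char)) :=
  match comb with
  | [] => []
  | x :: xs => x :: List.zipWith (fun prev cur => prev.map (fun s => c :: s) ++ cur) (x :: xs) xs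

def secuencia_alt (dato : String) (N : Int) (index : Int) (act : String) (resultados : List String) : List String :=
  if N ≤ 0 then resultados
  else
    let actL := act.toList
    let need : Int := N - (actL.length : Int)
    if need < 0 then resultados
    else
      let tail := PySem.List.slice dato.toList (some index) none   -- dato[index:]
      if (tail.length : Int) < need then resultados
      else
      -- the j-loop runs from len(tail)-1 down to 0, i.e. a foldr over tail
      let table := tail.foldr altStep ([[]] :: List.replicate need.toNat [])
      let cands := table.getD need.toNat []
      cands.foldl
        (fun r c =>
          if String.ofList (actL ++ c) ∈ r then r else r ++ [String.ofList (actL ++ c)])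
        resultados

-- ===== PRECONDITION & SPEC =====
-- Pre_ excludes only calls with a negative index that actually scan the string (0 < N together
-- with len(act) < N, or with N ≤ len(act) and index < -len(dato)): there Python's negative-index
-- wraparound makes A read dato from the end (and raise IndexError once an index below -len(dato)
-- is dereferenced), an accidental corner the slice-based B does not mimic.
def Pre_secuencia (dato : String) (N : Int) (index : Int) (act : String) (resultados : List String) : Prop :=
  0 ≤ index ∨ N ≤ 0 ∨ (PySem.Str.len act = N ∧ act ∉ resultados)
    ∨ (N ≤ PySem.Str.len act ∧ -(PySem.Str.len dato) ≤ index)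
instance (dato : String) (N : Int) (index : Int) (act : String) (resultados : List String) : Decidable (Pre_secuencia dato N index act resultados) := by unfold Pre_secuencia; infer_instance
def pvWitness_secuencia : String × Int × Int × String × List String := ("ab", 2, 0, "", [])

def Spec_secuencia (dato : String) (N : Int) (index : Int) (act : String) (resultados : List String) (out : List String) : Prop := out = secuencia_alt dato N index act resultados
instance (dato : String) (N : Int) (index : Int) (act : String) (resultados : List String) (out : List String) : Decidable (Spec_secuencia dato N index act resultados out) := by unfold Spec_secuencia; infer_instance

-- ===== CLAIM (what is proved, stated in full; the proofs are below) =====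
def Claim_equal_secuencia : Prop := ∀ (dato : String) (N : Int) (index : Int) (act : String) (resultados : List String), Dom_secuencia dato N index act resultados → Pre_secuencia dato N index act resultados → Spec_secuencia dato N index act resultados (secuencia dato N index act resultados)

-- ===== LEMMAS AND PROOFS =====

-- the dedup-append step shared by both sides, and A's candidate list characterised as combinations
def pvDed (r : List String) (s : String) : List String := if s ∈ r then r else r ++ [s]
def pvCand (dato act : List Char) (j k : Nat) : List String :=
  (PySem.List.combinations (dato.drop j) k).map (fun c => String.ofList (act ++ c))

theorem pvLoop_over (f : Nat) : ∀ (dato : List Char) (N i : Int) (act : List Char) (res : List String),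
    (dato.length : Int) - i ≤ f → 0 < N → N ≤ (act.length : Int) →
    secuenciaLoop dato N i act res = res := by
  induction f with
  | zero =>
    intro dato N i act res hf hN ha
    rw [secuenciaLoop, dif_neg (by omega)]
  | succ f ih =>
    intro dato N i act res hf hN ha
    by_cases h : i < (dato.length : Int)
    · have hin : secuenciaGo dato N (i + 1) (act ++ [PySem.List.pyGetD dato i ' ']) res = res := by
        rw [secuenciaGo, if_neg (by omega), if_neg (by
          rintro ⟨h1, -⟩
          simp only [List.length_append, List.length_cons, List.length_nil] at h1
          omega)]
        split_ifs with h2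
        · rfl
        · exact ih dato N (i + 1) (act ++ [PySem.List.pyGetD dato i ' ']) res (by omega) hN
            (by simp only [List.length_append, List.length_cons, List.length_nil]; omega)
      rw [secuenciaLoop, dif_pos h, hin]
      exact ih dato N (i + 1) act res (by omega) hN ha
    · rw [secuenciaLoop, dif_neg h]

theorem pvMain (f : Nat) :
    (∀ (dato : List Char) (N : Int) (i : Nat) (act : List Char) (res : List String),
      (dato.length : Int) - i ≤ f → 0 < N → (act.length : Int) < N →
      secuenciaLoop dato N i act res = (pvCand dato act i (N - act.length).toNat).foldl pvDed res)
    ∧ (∀ (dato : List Char) (N : Int) (j : Nat) (act : List Char) (res : List String),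
      (dato.length : Int) - j ≤ f → 0 < N → (act.length : Int) ≤ N →
      secuenciaGo dato N j act res = (pvCand dato act j (N - act.length).toNat).foldl pvDed res) := by
  induction f with
  | zero =>
    constructor
    · intro dato N i act res hf hN hLt
      obtain ⟨k', hk⟩ : ∃ k', (N - (act.length : Int)).toNat = k' + 1 := ⟨(N - act.length - 1).toNat, by omega⟩
      rw [secuenciaLoop, dif_neg (by omega)]
      rw [pvCand, List.drop_eq_nil_of_le (by omega), hk, PySem.List.combinations_nil_succ]
      rfl
    · intro dato N j act res hf hN hLe
      rw [secuenciaGo, if_neg (by omega)]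
      by_cases hEq : (act.length : Int) = N
      · have hk : (N - (act.length : Int)).toNat = 0 := by omega
        rw [pvCand, hk, PySem.List.combinations_zero]
        by_cases hm : String.ofList act ∈ res
        · rw [if_neg (by rintro ⟨-, h2⟩; exact h2 hm), if_pos (by omega)]
          simp [pvDed, hm]
        · rw [if_pos ⟨hEq, hm⟩]; simp [pvDed, hm]
      · have hLt : (act.length : Int) < N := by omega
        obtain ⟨k', hk⟩ : ∃ k', (N - (act.length : Int)).toNat = k' + 1 := ⟨(N - act.length - 1).toNat, by omega⟩
        rw [if_neg (by rintro ⟨h1, -⟩; exact hEq h1), if_pos (by omega)]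
        rw [pvCand, List.drop_eq_nil_of_le (by omega), hk, PySem.List.combinations_nil_succ]
        rfl
  | succ f ih =>
    have hLoop : ∀ (dato : List Char) (N : Int) (i : Nat) (act : List Char) (res : List String),
        (dato.length : Int) - i ≤ f + 1 → 0 < N → (act.length : Int) < N →
        secuenciaLoop dato N i act res = (pvCand dato act i (N - act.length).toNat).foldl pvDed res := by
      intro dato N i act res hf hN hLt
      by_cases h : (i : Int) < (dato.length : Int)
      · have hi : i < dato.length := by exact_mod_cast h
        have hc : PySem.List.pyGetD dato (i : Int) ' ' = dato[i] := by
          rw [PySem.List.pyGetD_natCast, List.getD_eq_getElem dato ' ' hi]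
        set k' : Nat := (N - (act.length : Int) - 1).toNat with hk'
        have hk : (N - (act.length : Int)).toNat = k' + 1 := by omega
        have hlen' : ((act ++ [dato[i]]).length : Int) = (act.length : Int) + 1 := by
          simp
        have hcast : ((i : Int) + 1) = ((i + 1 : Nat) : Int) := by push_cast; ring
        have hinner := ih.2 dato N (i + 1) (act ++ [dato[i]]) res (by push_cast; omega) hN
          (by rw [hlen']; omega)
        rw [show (N - ((act ++ [dato[i]]).length : Int)).toNat = k' by rw [hlen']; omega] at hinner
        rw [secuenciaLoop, dif_pos h, hc, hcast, hinner]
        rw [ih.1 dato N (i + 1) act _ (by push_cast; omega) hN hLt]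
        simp only [pvCand]
        rw [List.drop_eq_getElem_cons hi, hk, PySem.List.combinations_cons_succ,
          List.map_append, List.foldl_append, List.map_map]
        congr 1
        exact congrArg (fun l => List.foldl pvDed res l)
          (List.map_congr_left (fun cmb _ => by
            simp only [Function.comp_apply, List.append_assoc, List.singleton_append]))
      · rw [secuenciaLoop, dif_neg h]
        obtain ⟨k', hk⟩ : ∃ k', (N - (act.length : Int)).toNat = k' + 1 := ⟨(N - act.length - 1).toNat, by omega⟩
        rw [pvCand, List.drop_eq_nil_of_le (by omega), hk, PySem.List.combinations_nil_succ]
        rfl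
    refine ⟨hLoop, ?_⟩
    intro dato N j act res hf hN hLe
    rw [secuenciaGo, if_neg (by omega)]
    by_cases hEq : (act.length : Int) = N
    · have hk : (N - (act.length : Int)).toNat = 0 := by omega
      rw [pvCand, hk, PySem.List.combinations_zero]
      by_cases hm : String.ofList act ∈ res
      · rw [if_neg (by rintro ⟨-, h2⟩; exact h2 hm)]
        split_ifs with h3
        · simp [pvDed, hm]
        · rw [pvLoop_over (f + 1) dato N j act res hf hN (by omega)]
          simp [pvDed, hm]
      · rw [if_pos ⟨hEq, hm⟩]; simp [pvDed, hm]
    · have hLt : (act.length : Int) < N := by omega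
      rw [if_neg (by rintro ⟨h1, -⟩; exact hEq h1)]
      split_ifs with h3
      · obtain ⟨k', hk⟩ : ∃ k', (N - (act.length : Int)).toNat = k' + 1 := ⟨(N - act.length - 1).toNat, by omega⟩
        rw [pvCand, List.drop_eq_nil_of_le (by omega), hk, PySem.List.combinations_nil_succ]
        rfl
      · exact hLoop dato N j act res hf hN hLt

-- A-side corollaries for the index-independent branches
theorem pvGo_eq0 (dato : List Char) (N index : Int) (act : List Char) (res : List String)
    (hN : 0 < N) (hEq : (act.length : Int) = N) :
    secuenciaGo dato N index act res
      = if String.ofList act ∈ res then res else res ++ [String.ofList act] := by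
  rw [secuenciaGo, if_neg (by omega)]
  by_cases hm : String.ofList act ∈ res
  · rw [if_neg (by rintro ⟨-, h2⟩; exact h2 hm)]
    split_ifs with h3
    · rfl
    · exact pvLoop_over ((dato.length : Int) - index).toNat dato N index act res (by omega) hN (by omega)
  · rw [if_pos ⟨hEq, hm⟩, if_neg hm]

theorem pvGo_over (dato : List Char) (N index : Int) (act : List Char) (res : List String)
    (hN : 0 < N) (hGt : N < (act.length : Int)) :
    secuenciaGo dato N index act res = res := by
  rw [secuenciaGo, if_neg (by omega), if_neg (by rintro ⟨h1, -⟩; omega)]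
  split_ifs with h3
  · rfl
  · exact pvLoop_over ((dato.length : Int) - index).toNat dato N index act res (by omega) hN (by omega)

-- B-side: the suffix DP table is the rows of combinations
theorem pvZip (c : Char) : ∀ (n : Nat) (g : Nat → List (List Char)),
    List.zipWith (fun prev cur => prev.map (fun s => c :: s) ++ cur)
        ((List.range (n + 1)).map g) ((List.range n).map (fun k => g (k + 1)))
      = (List.range n).map (fun k => (g k).map (fun s => c :: s) ++ g (k + 1)) := by
  intro n
  induction n with
  | zero => intro g; simp
  | succ n ih =>
    intro g
    have h2 : (List.range (n + 1)).map (fun k => g (k + 1))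
        = g 1 :: (List.range n).map (fun k => g (k + 1 + 1)) := by
      rw [List.range_succ_eq_map, List.map_cons, List.map_map]; rfl
    have h1 : (List.range (n + 1 + 1)).map g = g 0 :: (List.range (n + 1)).map (fun k => g (k + 1)) := by
      rw [List.range_succ_eq_map, List.map_cons, List.map_map]; rfl
    have h3 : (List.range (n + 1)).map (fun k => (g k).map (fun s => c :: s) ++ g (k + 1))
        = ((g 0).map (fun s => c :: s) ++ g 1)
          :: (List.range n).map (fun k => (g (k + 1)).map (fun s => c :: s) ++ g (k + 1 + 1)) := by
      rw [List.range_succ_eq_map, List.map_cons, List.map_map]; rfl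
    have ih' := ih (fun k => g (k + 1))
    simp only at ih'
    rw [h2] at ih'
    rw [h1, h2, List.zipWith_cons_cons, h3, ih']

theorem pvRowsNil : ∀ n : Nat, ([[]] :: List.replicate n ([] : List (List Char)))
    = (List.range (n + 1)).map (fun k => PySem.List.combinations ([] : List Char) k) := by
  intro n
  induction n with
  | zero => simp [List.range_succ]
  | succ n ih =>
    rw [List.range_succ, List.map_append, ← ih, List.replicate_succ']
    simp [PySem.List.combinations_nil_succ]

theorem pvStep (c : Char) (cs : List Char) (n : Nat) :
    altStep c ((List.range (n + 1)).map (fun k => PySem.List.combinations cs k))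
      = (List.range (n + 1)).map (fun k => PySem.List.combinations (c :: cs) k) := by
  have h1 : (List.range (n + 1)).map (fun k => PySem.List.combinations cs k)
      = PySem.List.combinations cs 0
        :: (List.range n).map (fun k => PySem.List.combinations cs (k + 1)) := by
    rw [List.range_succ_eq_map, List.map_cons, List.map_map]; rfl
  have h2 : (List.range (n + 1)).map (fun k => PySem.List.combinations (c :: cs) k)
      = PySem.List.combinations (c :: cs) 0
        :: (List.range n).map (fun k => PySem.List.combinations (c :: cs) (k + 1)) := by
    rw [List.range_succ_eq_map, List.map_cons, List.map_map]; rfl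
  have e2 := pvZip c n (fun k => PySem.List.combinations cs k)
  simp only at e2
  rw [h1, altStep, ← h1, e2, h2]
  simp only [PySem.List.combinations_zero, PySem.List.combinations_cons_succ]

theorem pvTable (cs : List Char) (n : Nat) :
    cs.foldr altStep ([[]] :: List.replicate n [])
      = (List.range (n + 1)).map (fun k => PySem.List.combinations cs k) := by
  induction cs with
  | nil => exact pvRowsNil n
  | cons c cs ih => rw [List.foldr_cons, ih, pvStep]

-- B unfolded on the three relevant shapes
theorem pvAlt_neg (dato : String) (N index : Int) (act : String) (res : List String)
    (hN : N ≤ 0) : secuencia_alt dato N index act res = res := by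
  rw [secuencia_alt, if_pos hN]

theorem pvAlt_over (dato : String) (N index : Int) (act : String) (res : List String)
    (hN : ¬ N ≤ 0) (hGt : N < (act.toList.length : Int)) :
    secuencia_alt dato N index act res = res := by
  rw [secuencia_alt, if_neg hN]
  simp only []
  rw [if_pos (by omega)]

theorem pvAlt_main (dato : String) (N index : Int) (act : String) (res : List String)
    (hN : ¬ N ≤ 0) (hLe : (act.toList.length : Int) ≤ N) (hidx : 0 ≤ index) :
    secuencia_alt dato N index act res
      = (pvCand dato.toList act.toList index.toNat (N - (act.toList.length : Int)).toNat).foldl pvDed res := by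
  rw [secuencia_alt, if_neg hN]
  simp only []
  rw [if_neg (by omega)]
  rw [show PySem.List.slice dato.toList (some index) none = dato.toList.drop index.toNat by
    rw [show index = ((index.toNat : Nat) : Int) from (Int.toNat_of_nonneg hidx).symm,
      PySem.List.slice_from_natCast]; simp; omega]
  by_cases hbig : ((List.drop index.toNat dato.toList).length : Int) < N - (act.toList.length : Int)
  · rw [if_pos hbig, pvCand,
      PySem.List.combinations_eq_nil_of_length_lt (dato.toList.drop index.toNat) (by omega),
      List.map_nil, List.foldl_nil]
  · rw [if_neg hbig, pvTable, PySem.List.getD_map_range _ _ _ _ (by omega)]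
    rw [pvCand, List.foldl_map]
    rfl

theorem pvAlt_exact (dato : String) (N index : Int) (act : String) (res : List String)
    (hN : ¬ N ≤ 0) (hEq : (act.toList.length : Int) = N) :
    secuencia_alt dato N index act res = if act ∈ res then res else res ++ [act] := by
  rw [secuencia_alt, if_neg hN]
  simp only []
  rw [if_neg (by omega), if_neg (by omega)]
  rw [pvTable, show (N - (act.toList.length : Int)).toNat = 0 by omega,
    PySem.List.getD_map_range _ _ _ _ (by omega), PySem.List.combinations_zero]
  simp [String.ofList_toList]

-- ===== VERDICT (by name: the statement is the Claim_ definition above) =====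
theorem secuencia_spec : Claim_equal_secuencia := by
  unfold Claim_equal_secuencia
  intro dato N index act res _ hPre
  unfold Spec_secuencia secuencia
  by_cases hN : N ≤ 0
  · rw [secuenciaGo, if_pos hN, pvAlt_neg dato N index act res hN]
  · by_cases hEq : (act.toList.length : Int) = N
    · rw [pvGo_eq0 dato.toList N index act.toList res (by omega) hEq,
        pvAlt_exact dato N index act res hN hEq]
      simp [String.ofList_toList]
    · by_cases hGt : N < (act.toList.length : Int)
      · rw [pvGo_over dato.toList N index act.toList res (by omega) hGt,
        pvAlt_over dato N index act res hN hGt]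
      · have hLt : (act.toList.length : Int) < N := by omega
        have hidx : 0 ≤ index := by
          rcases hPre with h | h | h | h
          · exact h
          · omega
          · rw [PySem.Str.len_eq] at h; omega
          · rw [PySem.Str.len_eq, PySem.Str.len_eq] at h; omega
        rw [pvAlt_main dato N index act res hN (by omega) hidx]
        have := (pvMain dato.toList.length).2 dato.toList N index.toNat act.toList res
          (by omega) (by omega) (by omega)
        rw [Int.toNat_of_nonneg hidx] at this
        exact this
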